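-- pv_equiv track=rewrite | github.com/Prabhakar-kar/PythonTraining | assignment_count_nonspvo.py | count_non_spvo
-- ===== SOURCE A (Python) =====
-- def count_non_spvo(s):
--     count = 0
--     vowels = "aeiouAEIOU"
--     for char in s:
--         if char in vowels:
--             continue
--         if char != ' ':
--             count += 1
--     return count
-- ===== SOURCE B (Python) =====
-- def count_non_spvo(s):
--     vowels = "aeiouAEIOU"
--     return len(s) - s.count(' ') - sum(s.count(v) for v in vowels)
-- ===== Notes on version B (the rewrite author's own statement) =====
-- stated objective: simpler
-- what changed: Replaces the per-character filter loop with a one-line total-minus-excluded-classes computation: len(s) minus the space count minus the sum of the ten vowel counts (the classes are disjoint).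
import Mathlib
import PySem

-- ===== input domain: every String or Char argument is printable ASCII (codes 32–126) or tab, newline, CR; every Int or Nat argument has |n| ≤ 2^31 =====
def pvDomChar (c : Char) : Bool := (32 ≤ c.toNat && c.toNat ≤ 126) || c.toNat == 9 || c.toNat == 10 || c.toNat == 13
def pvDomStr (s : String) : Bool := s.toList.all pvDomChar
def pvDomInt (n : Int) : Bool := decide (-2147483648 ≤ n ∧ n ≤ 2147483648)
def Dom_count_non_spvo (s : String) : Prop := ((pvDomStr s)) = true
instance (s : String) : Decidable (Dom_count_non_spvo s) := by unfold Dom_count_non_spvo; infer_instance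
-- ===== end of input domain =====

-- B replaces A's per-character filter loop by len(s) minus the space count minus the sum of the vowel counts (simpler, same cost).


-- ===== PORT A =====
-- 'char in vowels' for a single character is membership of that character (exact here).
def count_non_spvo (s : String) : Int :=
  let vowels : String := "aeiouAEIOU"
  s.toList.foldl (fun count char =>
    if char ∈ vowels.toList then count
    else if char ≠ ' ' then count + 1 else count) 0

-- ===== PORT B =====
def count_non_spvo_alt (s : String) : Int :=
  let vowels : String := "aeiouAEIOU"
  PySem.Str.len s - (PySem.Str.count s " " : Int)
    - vowels.toList.foldl (fun acc v => acc + (PySem.Str.count s (String.ofList [v]) : Int)) 0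

-- ===== PRECONDITION & SPEC =====
def Spec_count_non_spvo (s : String) (out : Int) : Prop := out = count_non_spvo_alt s
instance (s : String) (out : Int) : Decidable (Spec_count_non_spvo s out) := by unfold Spec_count_non_spvo; infer_instance

-- ===== CLAIM (what is proved, stated in full; the proofs are below) =====
def Claim_equal_count_non_spvo : Prop := ∀ (s : String), Dom_count_non_spvo s → Spec_count_non_spvo s (count_non_spvo s)

-- ===== LEMMAS AND PROOFS =====

-- PySem.Chars.count on a single-character needle is the plain character count.
theorem pv_go_single (c : Char) (l : List Char) (fuel acc : Nat) (hf : l.length ≤ fuel) :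
    PySem.Chars.count.go [c] fuel l acc = acc + l.count c := by
  induction l generalizing fuel acc with
  | nil => cases fuel <;> simp [PySem.Chars.count.go]
  | cons x t ih =>
    cases fuel with
    | zero => simp at hf
    | succ f =>
      rw [PySem.Chars.count.go]
      simp only [List.isPrefixOf, List.length_singleton, List.drop_one, List.tail_cons,
        List.count_cons]
      by_cases hc : c = x
      · subst hc; simp [ih f _ (by simpa using Nat.succ_le_succ_iff.mp hf)]; omega
      · simp [beq_iff_eq, hc, Ne.symm hc, ih f acc (by simpa using Nat.succ_le_succ_iff.mp hf)]

theorem pv_count_single (l : List Char) (c : Char) :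
    PySem.Chars.count l [c] = l.count c := by
  simp [PySem.Chars.count, pv_go_single c l l.length 0 le_rfl]

-- sum of per-vowel counts over a cons
theorem pv_vsum_cons (V : List Char) (c : Char) (t : List Char) :
    (V.map (fun v => ((c :: t).count v : Int))).sum
      = (V.map (fun v => (t.count v : Int))).sum + (V.count c : Int) := by
  have h : (V.map (fun v => ((c :: t).count v : Int)))
      = V.map (fun v => (t.count v : Int) + (if (v == c : Bool) then 1 else 0)) := by
    apply List.map_congr_left; intro v _
    rw [List.count_cons]; push_cast
    by_cases hv : (c == v : Bool) = true
    · have hv' : (v == c : Bool) = true := by simp_all [beq_iff_eq]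
      rw [if_pos hv, if_pos hv']
    · have hv' : ¬ (v == c : Bool) = true := by simp_all [beq_iff_eq]; exact fun e => hv e.symm
      rw [if_neg hv, if_neg hv']
  rw [h, PySem.List.sum_map_add_int, PySem.List.sum_map_ite_one_zero]
  congr 2

-- the heart: A's accumulating loop equals length − spaces − per-vowel-count sum,
-- for any vowel list without a space and any accumulator
theorem pv_key (V : List Char) (hsV : ' ' ∉ V) (hn : V.Nodup) (l : List Char) (acc : Int) :
    l.foldl (fun count char =>
      if char ∈ V then count else if char ≠ ' ' then count + 1 else count) acc
    = acc + (l.length : Int) - (l.count ' ' : Int)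
        - (V.map (fun v => (l.count v : Int))).sum := by
  induction l generalizing acc with
  | nil => simp
  | cons c t ih =>
    rw [List.foldl_cons, ih, pv_vsum_cons, List.length_cons, List.count_cons]
    by_cases hv : c ∈ V
    · have h1 : V.count c = 1 := List.count_eq_one_of_mem hn hv
      have h2 : ¬ (c == ' ') = true := by
        simp only [beq_iff_eq]; rintro rfl; exact hsV hv
      simp only [hv, if_true, h1, h2]
      push_cast; ring
    · have h1 : V.count c = 0 := List.count_eq_zero.mpr hv
      simp only [hv, if_false, h1]
      by_cases hs : c = ' '
      · simp only [hs, ne_eq, not_true_eq_false, if_false, beq_self_eq_true, if_true]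
        push_cast; ring
      · have h2 : ¬ (c == ' ') = true := by simpa using hs
        simp only [ne_eq, hs, not_false_eq_true, if_true, h2]
        push_cast; ring

-- ===== VERDICT (by name: the statement is the Claim_ definition above) =====
theorem count_non_spvo_spec : Claim_equal_count_non_spvo := by
  intro s _
  unfold Spec_count_non_spvo count_non_spvo count_non_spvo_alt
  rw [pv_key "aeiouAEIOU".toList (by decide) (by decide)]
  have hsp : (" " : String).toList = [' '] := rfl
  simp only [PySem.Str.len, PySem.Str.count_eq, PySem.List.foldl_add, hsp,
    String.toList_ofList, pv_count_single]
  push_cast; ring
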